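-- pv_equiv track=rewrite | github.com/MinbinGong/OpenStack-Ocata | searchlight-2.0.0/searchlight/common/utils.py | expand_type_matches
-- ===== SOURCE A (Python) =====
-- def expand_type_matches(types, document_types):
--     """Returns a list that will be at least the length of `types`. If an item
--     ends with a wildcard character and matches at least one plugin document
--     type it'll be replaced with the matches in the return list.
--      """
--     expanded_types = []
--     for _type in types:
--         if _type.endswith('*'):
--             matches = [doc_type for doc_type in document_types
--                        if doc_type.startswith(_type[:-1])]
--             if matches:
--                 expanded_types.extend(matches)
--                 continue
--
--         # If we got here, either wasn't a wildcard or didn't match anything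
--         expanded_types.append(_type)
--
--     return expanded_types
-- ===== SOURCE B (Python) =====
-- def expand_type_matches(types, document_types):
--     """Document-major rewrite: one pass over document_types distributes each
--     doc type into per-wildcard buckets; the output is then assembled from the
--     buckets in one pass over types."""
--     buckets = [[] for _ in types]
--     wildcard_prefixes = [(i, t[:-1]) for i, t in enumerate(types)
--                          if t.endswith('*')]
--     for doc_type in document_types:
--         for i, prefix in wildcard_prefixes:
--             if doc_type.startswith(prefix):
--                 buckets[i].append(doc_type)
--     expanded_types = []
--     for i, t in enumerate(types):
--         if buckets[i]:
--             expanded_types.extend(buckets[i])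
--         else:
--             expanded_types.append(t)
--     return expanded_types
-- ===== Notes on version B (the rewrite author's own statement) =====
-- stated objective: alternative
-- what changed: Inverted the traversal: instead of scanning document_types once per type, B makes a single pass over document_types distributing each doc into per-wildcard buckets, then assembles the output from the buckets in one pass over types.
import Mathlib
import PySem

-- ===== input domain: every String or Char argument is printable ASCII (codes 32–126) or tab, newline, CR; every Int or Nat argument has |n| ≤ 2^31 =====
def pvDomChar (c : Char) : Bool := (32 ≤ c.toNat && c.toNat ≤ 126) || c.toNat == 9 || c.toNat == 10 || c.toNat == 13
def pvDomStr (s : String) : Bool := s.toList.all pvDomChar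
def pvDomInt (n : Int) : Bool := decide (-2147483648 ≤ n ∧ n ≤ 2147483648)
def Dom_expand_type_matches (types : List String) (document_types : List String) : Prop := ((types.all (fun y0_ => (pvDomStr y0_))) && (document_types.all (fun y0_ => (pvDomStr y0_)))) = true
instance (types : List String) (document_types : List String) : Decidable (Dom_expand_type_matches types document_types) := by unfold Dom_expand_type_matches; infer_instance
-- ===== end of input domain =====

-- B inverts A's traversal (one pass over document_types into per-wildcard buckets, then one pass over types); same results, alternative structure, no speed claim.


-- ===== PORT A =====
-- Literal port of A (type-major: for each type, scan document_types for prefix matches).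
-- Python's local variable `matches` is rendered as `matched` (reserved word in Lean).
def expand_type_matches (types : List String) (document_types : List String) : List String :=
  types.foldl (fun expanded_types _type =>
    if PySem.Str.endswith _type "*" then
      let matched := document_types.filter
        (fun doc_type => PySem.Str.startswith doc_type (PySem.Str.slice _type none (some (-1))))
      if matched.isEmpty then expanded_types ++ [_type] else expanded_types ++ matched
    else expanded_types ++ [_type]) []

-- ===== PORT B =====
-- Python enumerate(xs): indices are nonnegative, so Nat indices are exact here.
def pvEnumN {α : Type} : List α → Nat → List (Nat × α)
  | [], _ => []
  | x :: xs, s => (s, x) :: pvEnumN xs (s + 1)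

-- wildcard_prefixes = [(i, t[:-1]) for i, t in enumerate(types) if t.endswith('*')]
def pvWildPrefixes (types : List String) : List (Nat × String) :=
  ((pvEnumN types 0).filter (fun it => PySem.Str.endswith it.2 "*")).map
    (fun it => (it.1, PySem.Str.slice it.2 none (some (-1))))

-- inner loop body of B: distribute one doc_type into every matching bucket
def pvDistribute (prefixes : List (Nat × String)) (doc_type : String)
    (buckets : List (List String)) : List (List String) :=
  prefixes.foldl (fun bs ip =>
    if PySem.Str.startswith doc_type ip.2 then bs.modify ip.1 (· ++ [doc_type]) else bs) buckets

def expand_type_matches_alt (types : List String) (document_types : List String) : List String :=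
  let prefixes := pvWildPrefixes types
  let buckets := document_types.foldl (fun bs d => pvDistribute prefixes d bs)
    (types.map (fun _ => ([] : List String)))
  (pvEnumN types 0).foldl (fun expanded_types it =>
    let b := (buckets[it.1]?).getD []
    if b.isEmpty then expanded_types ++ [it.2] else expanded_types ++ b) []

-- ===== PRECONDITION & SPEC =====
def Spec_expand_type_matches (types : List String) (document_types : List String) (out : List String) : Prop := out = expand_type_matches_alt types document_types
instance (types : List String) (document_types : List String) (out : List String) : Decidable (Spec_expand_type_matches types document_types out) := by unfold Spec_expand_type_matches; infer_instance

-- ===== CLAIM (what is proved, stated in full; the proofs are below) =====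
def Claim_equal_expand_type_matches : Prop := ∀ (types : List String) (document_types : List String), Dom_expand_type_matches types document_types → Spec_expand_type_matches types document_types (expand_type_matches types document_types)

-- ===== LEMMAS AND PROOFS =====

-- what A appends for a single type
def pvStepA (document_types : List String) (t : String) : List String :=
  if PySem.Str.endswith t "*" then
    let m := document_types.filter
      (fun d => PySem.Str.startswith d (PySem.Str.slice t none (some (-1))))
    if m.isEmpty then [t] else m
  else [t]

theorem pvA_eq_flatMap (types document_types : List String) :
    expand_type_matches types document_types = types.flatMap (pvStepA document_types) := by
  unfold expand_type_matches
  have hbody : (fun (expanded_types : List String) (_type : String) =>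
      if PySem.Str.endswith _type "*" then
        let matched := document_types.filter
          (fun doc_type => PySem.Str.startswith doc_type (PySem.Str.slice _type none (some (-1))))
        if matched.isEmpty then expanded_types ++ [_type] else expanded_types ++ matched
      else expanded_types ++ [_type]) =
      fun acc t => acc ++ pvStepA document_types t := by
    funext acc t
    unfold pvStepA
    split
    · exact (apply_ite (acc ++ ·) _ _ _).symm
    · rfl
  rw [hbody, PySem.List.foldl_append_eq_flatMap, List.nil_append]

theorem mem_pvEnumN {α : Type} (xs : List α) (s : Nat) (p : Nat × α) :
    p ∈ pvEnumN xs s ↔ ∃ (k : Nat) (h : k < xs.length), p = (s + k, xs[k]) := by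
  induction xs generalizing s with
  | nil => simp [pvEnumN]
  | cons x xs ih =>
    simp only [pvEnumN, List.mem_cons, ih]
    constructor
    · rintro (rfl | ⟨k, h, rfl⟩)
      · exact ⟨0, by simp, by simp⟩
      · exact ⟨k + 1, by simpa using h, by simp [Nat.add_assoc, Nat.add_comm 1 k]⟩
    · rintro ⟨k, h, rfl⟩
      cases k with
      | zero => left; simp
      | succ k =>
        right
        exact ⟨k, by simpa using h, by simp [Nat.add_assoc, Nat.add_comm 1 k]⟩

theorem pairwise_pvEnumN {α : Type} (xs : List α) (s : Nat) :
    (pvEnumN xs s).Pairwise (fun p q => p.1 < q.1) := by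
  induction xs generalizing s with
  | nil => exact List.Pairwise.nil
  | cons x xs ih =>
    refine List.Pairwise.cons ?_ (ih (s + 1))
    intro q hq
    rcases (mem_pvEnumN xs (s + 1) q).1 hq with ⟨k, h, rfl⟩
    simp; omega

theorem nodup_fst_pvWildPrefixes (types : List String) :
    ((pvWildPrefixes types).map Prod.fst).Nodup := by
  have h2 : ((pvWildPrefixes types).map Prod.fst).Pairwise (· < ·) := by
    unfold pvWildPrefixes
    rw [List.map_map]
    have hp := (pairwise_pvEnumN types 0).filter (fun it => PySem.Str.endswith it.2 "*")
    refine List.Pairwise.map _ (fun a b hab => ?_) hp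
    exact hab
  exact h2.imp Nat.ne_of_lt

theorem mem_pvWildPrefixes (types : List String) (j : Nat) (p : String) :
    (j, p) ∈ pvWildPrefixes types ↔
      ∃ (h : j < types.length), PySem.Str.endswith types[j] "*" = true ∧
        p = PySem.Str.slice types[j] none (some (-1)) := by
  unfold pvWildPrefixes
  constructor
  · intro hmem
    rcases List.mem_map.1 hmem with ⟨it, hit, heq⟩
    rcases List.mem_filter.1 hit with ⟨hen, he⟩
    rcases (mem_pvEnumN types 0 it).1 hen with ⟨k, h, rfl⟩
    simp only [Prod.mk.injEq] at heq
    obtain ⟨h1, h2⟩ := heq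
    have hj : j = k := by omega
    subst hj
    exact ⟨h, by simpa using he, h2.symm⟩
  · rintro ⟨h, he, rfl⟩
    refine List.mem_map.2 ⟨(j, types[j]), List.mem_filter.2 ⟨?_, he⟩, rfl⟩
    exact (mem_pvEnumN types 0 (j, types[j])).2 ⟨j, h, by simp⟩

theorem not_mem_fst_pvWildPrefixes (types : List String) (j : Nat) (h : j < types.length)
    (hne : ¬ PySem.Str.endswith types[j] "*" = true) :
    j ∉ (pvWildPrefixes types).map Prod.fst := by
  intro hmem
  rcases List.mem_map.1 hmem with ⟨⟨i, p⟩, hip, hfst⟩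
  simp only at hfst
  subst hfst
  rcases (mem_pvWildPrefixes types i p).1 hip with ⟨h', he, _⟩
  exact hne he

theorem pvDistribute_untouched (prefixes : List (Nat × String)) (d : String)
    (bs : List (List String)) (j : Nat) (hj : j ∉ prefixes.map Prod.fst) :
    (pvDistribute prefixes d bs)[j]? = bs[j]? := by
  induction prefixes generalizing bs with
  | nil => rfl
  | cons ip ps ih =>
    simp only [List.map_cons, List.mem_cons, not_or] at hj
    show (pvDistribute ps d (if PySem.Str.startswith d ip.2
        then bs.modify ip.1 (· ++ [d]) else bs))[j]? = bs[j]?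
    rw [ih _ hj.2]
    split
    · exact List.getElem?_modify_ne _ _ (fun h => hj.1 h.symm)
    · rfl

theorem pvDistribute_touched (prefixes : List (Nat × String)) (d : String)
    (bs : List (List String)) (j : Nat) (p : String)
    (hmem : (j, p) ∈ prefixes) (hnd : (prefixes.map Prod.fst).Nodup) :
    (pvDistribute prefixes d bs)[j]? =
      bs[j]?.map (fun l => if PySem.Str.startswith d p then l ++ [d] else l) := by
  induction prefixes generalizing bs with
  | nil => simp at hmem
  | cons ip ps ih =>
    simp only [List.map_cons, List.nodup_cons] at hnd
    show (pvDistribute ps d (if PySem.Str.startswith d ip.2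
        then bs.modify ip.1 (· ++ [d]) else bs))[j]? = _
    rcases List.mem_cons.1 hmem with h | h
    · subst h
      rw [pvDistribute_untouched ps d _ j hnd.1]
      split
      · rw [List.getElem?_modify_eq]
        cases bs[j]? <;> simp
      · cases bs[j]? <;> simp
    · rw [ih _ h hnd.2]
      congr 1
      split
      · refine List.getElem?_modify_ne _ _ (fun hij => ?_)
        exact hnd.1 (hij ▸ List.mem_map.2 ⟨(j, p), h, rfl⟩)
      · rfl

theorem pvBuckets_untouched (document_types : List String) (prefixes : List (Nat × String))
    (bs : List (List String)) (j : Nat) (hj : j ∉ prefixes.map Prod.fst) :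
    (document_types.foldl (fun bs d => pvDistribute prefixes d bs) bs)[j]? = bs[j]? := by
  induction document_types generalizing bs with
  | nil => rfl
  | cons d ds ih =>
    simp only [List.foldl_cons]
    rw [ih, pvDistribute_untouched _ _ _ _ hj]

theorem pvBuckets_touched (document_types : List String) (prefixes : List (Nat × String))
    (bs : List (List String)) (j : Nat) (p : String)
    (hmem : (j, p) ∈ prefixes) (hnd : (prefixes.map Prod.fst).Nodup) :
    (document_types.foldl (fun bs d => pvDistribute prefixes d bs) bs)[j]? =
      bs[j]?.map (fun l => l ++ document_types.filter (fun d => PySem.Str.startswith d p)) := by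
  induction document_types generalizing bs with
  | nil => simp
  | cons d ds ih =>
    simp only [List.foldl_cons]
    rw [ih _, pvDistribute_touched _ _ _ _ _ hmem hnd]
    cases bs[j]? with
    | none => simp
    | some l =>
      simp only [Option.map_some, List.filter_cons]
      split <;> simp

-- the output fold of B, over any index/type list whose buckets are characterized
theorem pvOut_fold (L : List (Nat × String)) (buckets : List (List String))
    (document_types : List String)
    (hchar : ∀ q ∈ L, (buckets[q.1]?).getD [] =
      if PySem.Str.endswith q.2 "*" = true then
        document_types.filter
          (fun d => PySem.Str.startswith d (PySem.Str.slice q.2 none (some (-1))))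
      else []) :
    ∀ acc, L.foldl (fun expanded_types it =>
      let b := (buckets[it.1]?).getD []
      if b.isEmpty then expanded_types ++ [it.2] else expanded_types ++ b) acc =
      acc ++ L.flatMap (fun q => pvStepA document_types q.2) := by
  induction L with
  | nil => intro acc; simp
  | cons q L ih =>
    intro acc
    simp only [List.foldl_cons, List.flatMap_cons]
    rw [ih (fun r hr => hchar r (List.mem_cons_of_mem q hr))]
    have hq := hchar q (by simp)
    simp only [hq]
    unfold pvStepA
    split
    · split <;> simp_all
    · rename_i he
      simp

theorem map_snd_pvEnumN {α : Type} (xs : List α) (s : Nat) :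
    (pvEnumN xs s).map Prod.snd = xs := by
  induction xs generalizing s with
  | nil => rfl
  | cons x xs ih => simp [pvEnumN, ih]

theorem pvBuckets_char (types document_types : List String) (k : Nat) (hk : k < types.length) :
    (((document_types.foldl (fun bs d => pvDistribute (pvWildPrefixes types) d bs)
        (types.map (fun _ => ([] : List String))))[k]?).getD []) =
      if PySem.Str.endswith types[k] "*" = true then
        document_types.filter
          (fun d => PySem.Str.startswith d (PySem.Str.slice types[k] none (some (-1))))
      else [] := by
  have hbase : (types.map (fun _ => ([] : List String)))[k]? = some [] := by
    rw [List.getElem?_map, List.getElem?_eq_getElem hk]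
    rfl
  by_cases he : PySem.Str.endswith types[k] "*" = true
  · rw [pvBuckets_touched document_types (pvWildPrefixes types) _ k
      (PySem.Str.slice types[k] none (some (-1)))
      ((mem_pvWildPrefixes types k _).2 ⟨hk, he, rfl⟩) (nodup_fst_pvWildPrefixes types)]
    rw [hbase, if_pos he]
    rfl
  · rw [pvBuckets_untouched document_types (pvWildPrefixes types) _ k
      (not_mem_fst_pvWildPrefixes types k hk he)]
    rw [hbase, if_neg he]
    rfl

-- ===== VERDICT (by name: the statement is the Claim_ definition above) =====
theorem expand_type_matches_spec : Claim_equal_expand_type_matches := by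
  intro types document_types _
  unfold Spec_expand_type_matches
  rw [pvA_eq_flatMap]
  show _ = (pvEnumN types 0).foldl _ []
  rw [pvOut_fold (pvEnumN types 0) _ document_types ?_ []]
  · rw [List.nil_append]
    conv_lhs => rw [← map_snd_pvEnumN types 0]
    rw [List.flatMap_map]
  · intro q hq
    rcases (mem_pvEnumN types 0 q).1 hq with ⟨k, hk, rfl⟩
    simpa using pvBuckets_char types document_types k hk
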